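-- pv_equiv track=rewrite | github.com/nickponline/aoc-2025 | 12/main.py | get_valid_placements
-- ===== SOURCE A (Python) =====
-- def get_valid_placements(cells, width, height):
--     placements = []
--     for anchor_r in range(height):
--         for anchor_c in range(width):
--             # Check if all cells fit within bounds
--             valid = True
--             for dr, dc in cells:
--                 r, c = anchor_r + dr, anchor_c + dc
--                 if r < 0 or r >= height or c < 0 or c >= width:
--                     valid = False
--                     break
--             if valid:
--                 placements.append((anchor_r, anchor_c))
--     return placements
-- ===== SOURCE B (Python) =====
-- def get_valid_placements(cells, width, height):
--     if cells:
--         drs = [dr for dr, _ in cells]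
--         dcs = [dc for _, dc in cells]
--         r_lo = max(0, -min(drs))
--         r_hi = min(height, height - max(drs))
--         c_lo = max(0, -min(dcs))
--         c_hi = min(width, width - max(dcs))
--     else:
--         r_lo, r_hi, c_lo, c_hi = 0, height, 0, width
--     return [(r, c) for r in range(r_lo, r_hi) for c in range(c_lo, c_hi)]
-- ===== Notes on version B (the rewrite author's own statement) =====
-- stated objective: faster
-- what changed: Instead of testing every anchor in the height*width grid against every cell, B computes separable row/column anchor bounds from min/max of dr and dc once and enumerates only the valid rectangle in the same row-major order.
import Mathlib
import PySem

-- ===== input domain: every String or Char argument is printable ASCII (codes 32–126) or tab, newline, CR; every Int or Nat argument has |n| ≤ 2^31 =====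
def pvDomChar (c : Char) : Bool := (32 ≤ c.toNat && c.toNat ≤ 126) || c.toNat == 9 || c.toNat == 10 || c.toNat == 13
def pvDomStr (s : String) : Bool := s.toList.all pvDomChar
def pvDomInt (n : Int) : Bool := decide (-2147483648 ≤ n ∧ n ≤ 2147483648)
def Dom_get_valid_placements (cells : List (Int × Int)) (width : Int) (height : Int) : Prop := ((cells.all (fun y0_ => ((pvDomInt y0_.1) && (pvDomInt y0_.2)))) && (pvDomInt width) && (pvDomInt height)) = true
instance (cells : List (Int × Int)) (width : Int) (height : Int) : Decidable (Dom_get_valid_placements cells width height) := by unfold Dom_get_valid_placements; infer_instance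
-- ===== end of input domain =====

-- B replaces A's scan of every anchor (rechecking all cells at each) by separable
-- row/column anchor bounds from min/max of dr and dc, enumerating only the valid rectangle
-- in the same row-major order (objective: faster, asymptotic).

-- ===== PORT A =====
-- the inner 'for dr, dc in cells: … break' loop of A
def pvValidAt : List (Int × Int) → Int → Int → Int → Int → Bool
  | [], _, _, _, _ => true
  | (dr, dc) :: rest, anchor_r, anchor_c, width, height =>
    let r := anchor_r + dr
    let c := anchor_c + dc
    if r < 0 ∨ r ≥ height ∨ c < 0 ∨ c ≥ width then false
    else pvValidAt rest anchor_r anchor_c width height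

def get_valid_placements (cells : List (Int × Int)) (width : Int) (height : Int) : List (Int × Int) :=
  (PySem.List.pyRange 0 height 1).foldl (fun placements anchor_r =>
    (PySem.List.pyRange 0 width 1).foldl (fun placements anchor_c =>
      if pvValidAt cells anchor_r anchor_c width height
      then placements ++ [(anchor_r, anchor_c)]
      else placements) placements) []

-- ===== PORT B =====
def get_valid_placements_alt (cells : List (Int × Int)) (width : Int) (height : Int) : List (Int × Int) :=
  let bounds : Int × Int × Int × Int :=
    match cells with
    | [] => (0, height, 0, width)
    | c0 :: rest =>
      -- drs = [dr for dr,_ in cells]; dcs = [dc for _,dc in cells]; min/max of a nonempty list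
      let drs := rest.map Prod.fst
      let dcs := rest.map Prod.snd
      (max 0 (-(drs.foldl min c0.1)),
       min height (height - drs.foldl max c0.1),
       max 0 (-(dcs.foldl min c0.2)),
       min width (width - dcs.foldl max c0.2))
  match bounds with
  | (r_lo, r_hi, c_lo, c_hi) =>
    (PySem.List.pyRange r_lo r_hi 1).flatMap (fun r =>
      (PySem.List.pyRange c_lo c_hi 1).map (fun c => (r, c)))

-- ===== PRECONDITION & SPEC =====
def Spec_get_valid_placements (cells : List (Int × Int)) (width : Int) (height : Int) (out : List (Int × Int)) : Prop := out = get_valid_placements_alt cells width height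
instance (cells : List (Int × Int)) (width : Int) (height : Int) (out : List (Int × Int)) : Decidable (Spec_get_valid_placements cells width height out) := by unfold Spec_get_valid_placements; infer_instance

-- ===== CLAIM (what is proved, stated in full; the proofs are below) =====
def Claim_equal_get_valid_placements : Prop := ∀ (cells : List (Int × Int)) (width : Int) (height : Int), Dom_get_valid_placements cells width height → Spec_get_valid_placements cells width height (get_valid_placements cells width height)

-- ===== LEMMAS AND PROOFS =====

theorem pvFoldlMin_le_arg (l : List Int) (x : Int) : l.foldl min x ≤ x := by
  induction l generalizing x with
  | nil => simp
  | cons y t ih => exact le_trans (ih (min x y)) (min_le_left _ _)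

theorem pvFoldlMin_le_mem (l : List Int) (x y : Int) (h : y ∈ l) : l.foldl min x ≤ y := by
  induction l generalizing x with
  | nil => simp at h
  | cons z t ih =>
    rcases List.mem_cons.1 h with h | h
    · subst h; exact le_trans (pvFoldlMin_le_arg t (min x y)) (min_le_right _ _)
    · exact ih (min x z) h

theorem pvFoldlMin_attain (l : List Int) (x : Int) : l.foldl min x = x ∨ l.foldl min x ∈ l := by
  induction l generalizing x with
  | nil => exact Or.inl rfl
  | cons y t ih =>
    rcases ih (min x y) with h | h
    · rcases min_choice x y with h' | h'
      · exact Or.inl (by simpa [h'] using h)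
      · exact Or.inr (by simp [List.foldl_cons]; left; omega)
    · exact Or.inr (List.mem_cons_of_mem _ h)

theorem pvFoldlMax_le_arg (l : List Int) (x : Int) : x ≤ l.foldl max x := by
  induction l generalizing x with
  | nil => simp
  | cons y t ih => exact le_trans (le_max_left _ _) (ih (max x y))

theorem pvFoldlMax_le_mem (l : List Int) (x y : Int) (h : y ∈ l) : y ≤ l.foldl max x := by
  induction l generalizing x with
  | nil => simp at h
  | cons z t ih =>
    rcases List.mem_cons.1 h with h | h
    · subst h; exact le_trans (le_max_right _ _) (pvFoldlMax_le_arg t (max x y))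
    · exact ih (max x z) h

theorem pvFoldlMax_attain (l : List Int) (x : Int) : l.foldl max x = x ∨ l.foldl max x ∈ l := by
  induction l generalizing x with
  | nil => exact Or.inl rfl
  | cons y t ih =>
    rcases ih (max x y) with h | h
    · rcases max_choice x y with h' | h'
      · exact Or.inl (by simpa [h'] using h)
      · exact Or.inr (by simp [List.foldl_cons]; left; omega)
    · exact Or.inr (List.mem_cons_of_mem _ h)

-- filtering an int range by a box [lo, hi) is the clipped range
theorem pvFilter_pyRange (lo hi : Int) : ∀ (a b : Int),
    (PySem.List.pyRange a b 1).filter (fun x => decide (lo ≤ x) && decide (x < hi))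
      = PySem.List.pyRange (max a lo) (min b hi) 1 := by
  intro a b
  by_cases hab : b ≤ a
  · rw [PySem.List.pyRange_one_eq_nil hab, PySem.List.pyRange_one_eq_nil (by omega)]
    simp
  · push_neg at hab
    have hn : ((b - a).toNat) = (b - (a + 1)).toNat + 1 := by omega
    rw [PySem.List.pyRange_one_cons hab]
    have ih := pvFilter_pyRange lo hi (a + 1) b
    by_cases hpa : lo ≤ a ∧ a < hi
    · rw [List.filter_cons_of_pos (by simp [hpa.1, hpa.2]), ih,
          max_eq_left (by omega : lo ≤ a + 1), max_eq_left hpa.1,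
          PySem.List.pyRange_one_cons (lt_min hab hpa.2)]
    · rw [List.filter_cons_of_neg (by simp; omega), ih]
      by_cases hlo : a < lo
      · rw [max_eq_right (le_of_lt hlo), max_eq_right (by omega : a + 1 ≤ lo)]
      · -- then hi ≤ a: both ranges empty
        have hha : hi ≤ a := by omega
        rw [PySem.List.pyRange_one_eq_nil
              (le_trans (min_le_right b hi) (le_trans (by omega) (le_max_left (a + 1) lo))),
            PySem.List.pyRange_one_eq_nil
              (le_trans (min_le_right b hi) (le_trans hha (le_max_left a lo)))]
termination_by a b => (b - a).toNat
decreasing_by omega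

theorem pvFlatMap_ite {α β : Type} (l : List α) (p : α → Bool) (g : α → List β) :
    l.flatMap (fun x => if p x then g x else []) = (l.filter p).flatMap g := by
  induction l with
  | nil => rfl
  | cons y t ih =>
    by_cases hy : p y
    · rw [List.flatMap_cons, List.filter_cons_of_pos hy, List.flatMap_cons, ih, if_pos hy]
    · rw [List.flatMap_cons, List.filter_cons_of_neg hy, ih, if_neg hy]
      simp

theorem pvValidAt_eq_forall (cells : List (Int × Int)) (ar ac w h : Int) :
    pvValidAt cells ar ac w h
      = decide (∀ p ∈ cells, 0 ≤ ar + p.1 ∧ ar + p.1 < h ∧ 0 ≤ ac + p.2 ∧ ac + p.2 < w) := by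
  induction cells with
  | nil => simp [pvValidAt]
  | cons c0 t ih =>
    obtain ⟨dr, dc⟩ := c0
    by_cases hc : ar + dr < 0 ∨ ar + dr ≥ h ∨ ac + dc < 0 ∨ ac + dc ≥ w
    · rw [pvValidAt, if_pos hc]
      symm
      simp only [decide_eq_false_iff_not]
      intro hall
      have := hall (dr, dc) (List.mem_cons_self)
      simp at this
      omega
    · rw [pvValidAt, if_neg hc, ih]
      push_neg at hc
      have hiff : (∀ p ∈ t, 0 ≤ ar + p.1 ∧ ar + p.1 < h ∧ 0 ≤ ac + p.2 ∧ ac + p.2 < w)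
          ↔ (∀ p ∈ (dr, dc) :: t, 0 ≤ ar + p.1 ∧ ar + p.1 < h ∧ 0 ≤ ac + p.2 ∧ ac + p.2 < w) := by
        constructor
        · intro hall p hp
          rcases List.mem_cons.1 hp with hp | hp
          · subst hp; simp; omega
          · exact hall p hp
        · intro hall p hp; exact hall p (List.mem_cons_of_mem _ hp)
      exact decide_eq_decide.mpr hiff

-- separability: validity of an anchor is a product of a row condition and a column condition
theorem pvValidAt_separable (c0 : Int × Int) (rest : List (Int × Int)) (ar ac w h : Int) :
    pvValidAt (c0 :: rest) ar ac w h
      = ((decide (-((rest.map Prod.fst).foldl min c0.1) ≤ ar)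
          && decide (ar < h - (rest.map Prod.fst).foldl max c0.1))
         && (decide (-((rest.map Prod.snd).foldl min c0.2) ≤ ac)
          && decide (ac < w - (rest.map Prod.snd).foldl max c0.2))) := by
  rw [pvValidAt_eq_forall]
  have hattain : ∀ (f : Int × Int → Int),
      (∃ p ∈ c0 :: rest, f p = (rest.map f).foldl min (f c0)) ∧
      (∃ p ∈ c0 :: rest, f p = (rest.map f).foldl max (f c0)) := by
    intro f
    constructor
    · rcases pvFoldlMin_attain (rest.map f) (f c0) with h | h
      · exact ⟨c0, List.mem_cons_self, h.symm⟩
      · rcases List.mem_map.1 h with ⟨p, hp, hfp⟩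
        exact ⟨p, List.mem_cons_of_mem _ hp, hfp⟩
    · rcases pvFoldlMax_attain (rest.map f) (f c0) with h | h
      · exact ⟨c0, List.mem_cons_self, h.symm⟩
      · rcases List.mem_map.1 h with ⟨p, hp, hfp⟩
        exact ⟨p, List.mem_cons_of_mem _ hp, hfp⟩
  have hiff : (∀ p ∈ c0 :: rest, 0 ≤ ar + p.1 ∧ ar + p.1 < h ∧ 0 ≤ ac + p.2 ∧ ac + p.2 < w)
      ↔ ((-((rest.map Prod.fst).foldl min c0.1) ≤ ar ∧ ar < h - (rest.map Prod.fst).foldl max c0.1)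
         ∧ (-((rest.map Prod.snd).foldl min c0.2) ≤ ac ∧ ac < w - (rest.map Prod.snd).foldl max c0.2)) := by
    constructor
    · intro hall
      obtain ⟨⟨p1, hp1, he1⟩, ⟨p2, hp2, he2⟩⟩ := hattain Prod.fst
      obtain ⟨⟨p3, hp3, he3⟩, ⟨p4, hp4, he4⟩⟩ := hattain Prod.snd
      have h1 := hall p1 hp1
      have h2 := hall p2 hp2
      have h3 := hall p3 hp3
      have h4 := hall p4 hp4
      omega
    · intro hb p hp
      have hmin1 : (rest.map Prod.fst).foldl min c0.1 ≤ p.1 := by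
        rcases List.mem_cons.1 hp with hp | hp
        · subst hp; exact pvFoldlMin_le_arg _ _
        · exact pvFoldlMin_le_mem _ _ _ (List.mem_map.2 ⟨p, hp, rfl⟩)
      have hmax1 : p.1 ≤ (rest.map Prod.fst).foldl max c0.1 := by
        rcases List.mem_cons.1 hp with hp | hp
        · subst hp; exact pvFoldlMax_le_arg _ _
        · exact pvFoldlMax_le_mem _ _ _ (List.mem_map.2 ⟨p, hp, rfl⟩)
      have hmin2 : (rest.map Prod.snd).foldl min c0.2 ≤ p.2 := by
        rcases List.mem_cons.1 hp with hp | hp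
        · subst hp; exact pvFoldlMin_le_arg _ _
        · exact pvFoldlMin_le_mem _ _ _ (List.mem_map.2 ⟨p, hp, rfl⟩)
      have hmax2 : p.2 ≤ (rest.map Prod.snd).foldl max c0.2 := by
        rcases List.mem_cons.1 hp with hp | hp
        · subst hp; exact pvFoldlMax_le_arg _ _
        · exact pvFoldlMax_le_mem _ _ _ (List.mem_map.2 ⟨p, hp, rfl⟩)
      omega
  rw [Bool.eq_iff_iff]
  simp only [Bool.and_eq_true, decide_eq_true_eq]
  constructor
  · intro hP
    have hb := hiff.mp hP
    exact ⟨⟨hb.1.1, hb.1.2⟩, hb.2.1, hb.2.2⟩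
  · intro hB
    exact hiff.mpr ⟨⟨hB.1.1, hB.1.2⟩, hB.2.1, hB.2.2⟩

-- A as one flatMap over the full grid
theorem pvA_flatMap (cells : List (Int × Int)) (w h : Int) :
    get_valid_placements cells w h
      = (PySem.List.pyRange 0 h 1).flatMap (fun ar =>
          ((PySem.List.pyRange 0 w 1).filter (fun ac => pvValidAt cells ar ac w h)).map
            (fun ac => (ar, ac))) := by
  unfold get_valid_placements
  simp only [PySem.List.foldl_append_if]
  rw [PySem.List.foldl_append_eq_flatMap]
  simp

theorem get_valid_placements_eq (cells : List (Int × Int)) (w h : Int) :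
    get_valid_placements cells w h = get_valid_placements_alt cells w h := by
  rw [pvA_flatMap]
  cases cells with
  | nil =>
    unfold get_valid_placements_alt
    simp [pvValidAt]
  | cons c0 rest =>
    unfold get_valid_placements_alt
    simp only
    set mr := (rest.map Prod.fst).foldl min c0.1 with hmr
    set Mr := (rest.map Prod.fst).foldl max c0.1 with hMr
    set mc := (rest.map Prod.snd).foldl min c0.2 with hmc
    set Mc := (rest.map Prod.snd).foldl max c0.2 with hMc
    have hbody : ∀ ar : Int,
        ((PySem.List.pyRange 0 w 1).filter (fun ac => pvValidAt (c0 :: rest) ar ac w h)).map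
            (fun ac => (ar, ac))
        = if decide (-mr ≤ ar) && decide (ar < h - Mr)
          then (PySem.List.pyRange (max 0 (-mc)) (min w (w - Mc)) 1).map (fun ac => (ar, ac))
          else [] := by
      intro ar
      have hpred : (fun ac => pvValidAt (c0 :: rest) ar ac w h)
          = (fun ac => (decide (-mr ≤ ar) && decide (ar < h - Mr))
              && (decide (-mc ≤ ac) && decide (ac < w - Mc))) := by
        funext ac
        exact pvValidAt_separable c0 rest ar ac w h
      rw [hpred]
      by_cases hr : decide (-mr ≤ ar) && decide (ar < h - Mr)
      · rw [if_pos hr]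
        simp only [hr, Bool.true_and]
        rw [pvFilter_pyRange]
      · rw [if_neg hr]
        simp only [hr, Bool.false_and, List.filter_false, List.map_nil]
    rw [List.flatMap_congr (by intro ar _; exact hbody ar)]
    rw [pvFlatMap_ite]
    rw [pvFilter_pyRange]

-- ===== VERDICT (by name: the statement is the Claim_ definition above) =====
theorem get_valid_placements_spec : Claim_equal_get_valid_placements := by
  intro cells width height _
  unfold Spec_get_valid_placements
  exact get_valid_placements_eq cells width height
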